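-- pv_equiv track=rewrite | github.com/hong0708/algorithm | 프로그래머스_1/하샤드의수.py | solution
-- ===== SOURCE A (Python) =====
-- def solution(x):
--     answer = True
--     a = x
--     b = 0
--     while a > 0:
--         c = a % 10
--         b += c
--         a = a // 10
--     if x % b != 0:
--         answer = False
--     return answer
-- ===== SOURCE B (Python) =====
-- def solution(x):
--     b = sum(int(d) for d in str(x))
--     return x % b == 0
-- ===== Notes on version B (the rewrite author's own statement) =====
-- stated objective: idiomatic
-- what changed: Replaces the hand-written mod/div arithmetic loop and mutable answer flag with the idiomatic one-liner: digit sum via traversal of str(x), then a direct boolean expression x % b == 0.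
-- outside the precondition, e.g. on solution(0): A raises ZeroDivisionError, B raises ZeroDivisionError; on solution(-12): A raises ZeroDivisionError, B raises ValueError
import Mathlib
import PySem

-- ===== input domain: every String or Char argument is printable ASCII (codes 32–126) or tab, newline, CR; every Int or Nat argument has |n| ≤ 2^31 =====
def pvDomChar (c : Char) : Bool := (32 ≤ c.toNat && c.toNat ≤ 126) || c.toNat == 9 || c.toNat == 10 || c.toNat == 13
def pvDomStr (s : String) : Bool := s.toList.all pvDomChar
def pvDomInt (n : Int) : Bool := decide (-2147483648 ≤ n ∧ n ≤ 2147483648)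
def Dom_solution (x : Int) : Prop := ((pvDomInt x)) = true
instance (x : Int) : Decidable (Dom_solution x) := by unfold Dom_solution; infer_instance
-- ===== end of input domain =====

-- B computes the digit sum by traversing str(x) instead of A's mod/div arithmetic loop;
-- objective: idiomatic. Pre_ excludes x ≤ 0, where both Pythons raise (A: ZeroDivisionError; B: ValueError or ZeroDivisionError).


-- ===== PORT A =====
-- the `while a > 0` loop, carrying the state (a, b)
def solutionLoop (a b : Int) : Int :=
  if a > 0 then solutionLoop (PySem.Int.floordiv a 10) (b + PySem.Int.mod a 10) else b
termination_by a.toNat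
decreasing_by
  have : PySem.Int.floordiv a 10 < a := by
    rw [PySem.Int.floordiv, Int.fdiv_eq_ediv_of_nonneg _ (by norm_num)]
    exact Int.ediv_lt_of_lt_mul (by norm_num) (by omega : a < a * 10)
  omega

def solution (x : Int) : Bool :=
  let b := solutionLoop x 0
  -- Python raises ZeroDivisionError iff b = 0, which happens exactly when x ≤ 0 (excluded by Pre_)
  if PySem.Int.mod x b ≠ 0 then false else true

-- ===== PORT B =====
-- int(d) for a single decimal digit character d; exact on digit chars, the only chars of str(x) for x > 0
def pyDigitInt (c : Char) : Int := (c.toNat : Int) - 48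

def solution_alt (x : Int) : Bool :=
  let b := ((PySem.Int.toStr x).toList.map pyDigitInt).foldl (· + ·) 0
  PySem.Int.mod x b == 0

-- ===== PRECONDITION & SPEC =====
-- Pre_ excludes exactly x ≤ 0: there A's digit sum is 0 and `x % 0` raises ZeroDivisionError (B also raises)
def Pre_solution (x : Int) : Prop := 0 < x
instance (x : Int) : Decidable (Pre_solution x) := by unfold Pre_solution; infer_instance
def pvWitness_solution : Int := (18)
def Spec_solution (x : Int) (out : Bool) : Prop := out = solution_alt x
instance (x : Int) (out : Bool) : Decidable (Spec_solution x out) := by unfold Spec_solution; infer_instance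

-- ===== CLAIM (what is proved, stated in full; the proofs are below) =====
def Claim_equal_solution : Prop := ∀ (x : Int), Dom_solution x → Pre_solution x → Spec_solution x (solution x)

-- ===== LEMMAS AND PROOFS =====

-- common digit-sum (proof-only)
def digsumN (m : Nat) : Int :=
  if m = 0 then 0 else digsumN (m / 10) + (m % 10 : Nat)
decreasing_by exact Nat.div_lt_self (by omega) (by norm_num)

def sChars (l : List Char) : Int := (l.map pyDigitInt).sum

theorem digitChar_val (d : Nat) (hd : d < 10) : pyDigitInt d.digitChar = (d : Int) := by
  interval_cases d <;> decide

theorem sChars_cons (c : Char) (l : List Char) : sChars (c :: l) = pyDigitInt c + sChars l := by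
  simp [sChars]

theorem digsumN_small (n : Nat) (hn : n < 10) : digsumN n = (n : Int) := by
  rw [digsumN]
  by_cases hz : n = 0
  · simp [hz]
  · rw [if_neg hz, Nat.div_eq_of_lt hn, digsumN, if_pos rfl, Nat.mod_eq_of_lt hn]
    ring

theorem toDigitsCore_sum (f : Nat) : ∀ (n : Nat) (l : List Char), n < f →
    sChars (Nat.toDigitsCore 10 f n l) = digsumN n + sChars l := by
  induction f with
  | zero => intro n l h; omega
  | succ f ih =>
    intro n l h
    rw [Nat.toDigitsCore]
    by_cases h0 : n / 10 = 0
    · simp only [h0, if_true]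
      have hn : n < 10 := by omega
      rw [sChars_cons, digitChar_val _ (Nat.mod_lt _ (by norm_num)), digsumN_small n hn,
        Nat.mod_eq_of_lt hn]
    · simp only [h0, if_false]
      have hlt : n / 10 < f := by
        have := Nat.div_lt_self (by omega : 0 < n) (by norm_num : 1 < 10)
        omega
      rw [ih (n / 10) _ hlt, sChars_cons, digitChar_val _ (Nat.mod_lt _ (by norm_num))]
      have hz : ¬ n = 0 := by intro h'; subst h'; simp at h0
      conv_rhs => rw [digsumN]
      rw [if_neg hz]
      ring

theorem loop_eq (m : Nat) : ∀ (b : Int), solutionLoop (m : Int) b = b + digsumN m := by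
  induction m using Nat.strong_induction_on with
  | _ m ih =>
    intro b
    rw [solutionLoop, digsumN]
    by_cases hz : m = 0
    · subst hz; simp
    · have hm : (0:Int) < (m:Int) := by exact_mod_cast Nat.pos_of_ne_zero hz
      simp only [hm, if_pos, hz, if_false]
      have hfd : PySem.Int.floordiv (m : Int) 10 = ((m / 10 : Nat) : Int) := by
        rw [PySem.Int.floordiv, Int.fdiv_eq_ediv_of_nonneg _ (by norm_num)]
        exact_mod_cast rfl
      have hmod : PySem.Int.mod (m : Int) 10 = ((m % 10 : Nat) : Int) := by
        rw [PySem.Int.mod, Int.fmod_eq_emod, if_pos (Or.inl (by norm_num : (0:Int) ≤ 10))]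
        have h1 : ((m:Int) % 10) = ((m % 10 : Nat) : Int) := by exact_mod_cast rfl
        omega
      rw [hfd, hmod, ih (m / 10) (Nat.div_lt_self (Nat.pos_of_ne_zero hz) (by norm_num))]
      ring

theorem alt_sum_eq (x : Int) (hx : 0 < x) :
    ((PySem.Int.toStr x).toList.map pyDigitInt).foldl (· + ·) 0 = digsumN x.toNat := by
  rw [PySem.Int.toList_toStr]
  have : PySem.Int.toChars x = Nat.toDigits 10 x.toNat := by
    simp [PySem.Int.toChars, not_lt.mpr (le_of_lt hx)]
  rw [this, Nat.toDigits]
  have := toDigitsCore_sum (x.toNat + 1) x.toNat [] (by omega)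
  simp only [sChars, List.sum_eq_foldl] at this ⊢
  simpa using this

-- ===== VERDICT (by name: the statement is the Claim_ definition above) =====
theorem solution_spec : Claim_equal_solution := by
  intro x _ hx
  unfold Spec_solution solution solution_alt
  rw [alt_sum_eq x hx]
  have hA : solutionLoop x 0 = digsumN x.toNat := by
    have := loop_eq x.toNat 0
    rw [Int.toNat_of_nonneg (le_of_lt hx)] at this
    simpa using this
  rw [hA]
  by_cases h : PySem.Int.mod x (digsumN x.toNat) = 0 <;> simp [h]
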